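-- pv_equiv track=rewrite | github.com/aazizisoufiane/dspy-langgraph-crewai-comparison | src/dspy_langgraph_crewai_comparison/common/models.py | structural_check
-- ===== SOURCE A (Python) =====
-- def structural_check(
--     company_name: str,
--     sector: str,
--     recent_news: str,
--     financial_highlights: str,
--     key_events: str,
--     sources: str,
-- ) -> str:
--     """Check the structure of CompanyFacts before finalizing.
--     Pass each field as a string. Lists should be comma-separated items.
--     Returns 'PASS' if all checks pass, or a description of issues found."""
--     issues = []
--
--     # Parse comma-separated strings into lists
--     news_items = (
--         [x.strip() for x in recent_news.split(",") if x.strip()] if recent_news else []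
--     )
--     fin_items = (
--         [x.strip() for x in financial_highlights.split(",") if x.strip()]
--         if financial_highlights
--         else []
--     )
--     event_items = (
--         [x.strip() for x in key_events.split(",") if x.strip()] if key_events else []
--     )
--     source_items = (
--         [x.strip() for x in sources.split(",") if x.strip()] if sources else []
--     )
--
--     if not company_name.strip():
--         issues.append("company_name is empty")
--     if not sector.strip():
--         issues.append("sector is empty")
--     if len(news_items) < 3:
--         issues.append(f"Need at least 3 recent_news items, got {len(news_items)}")
--     if len(fin_items) < 2:
--         issues.append(f"Need at least 2 financial_highlights, got {len(fin_items)}")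
--     if len(event_items) < 1:
--         issues.append(f"Need at least 1 key_event, got {len(event_items)}")
--     if len(source_items) < 1:
--         issues.append(f"Need at least 1 source URL, got {len(source_items)}")
--
--     if issues:
--         return "ISSUES FOUND: " + "; ".join(issues)
--     return "PASS — all structural checks passed"
-- ===== SOURCE B (Python) =====
-- def structural_check(
--     company_name: str,
--     sector: str,
--     recent_news: str,
--     financial_highlights: str,
--     key_events: str,
--     sources: str,
-- ) -> str:
--     """Streaming check: counts non-blank comma-separated items with a one-pass
--     character state machine instead of building split/strip/filter lists."""
--
--     def count_items(s):
--         # number of comma-separated segments containing a non-whitespace char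
--         n, has = 0, False
--         for ch in s:
--             if ch == ",":
--                 n += has
--                 has = False
--             elif not ch.isspace():
--                 has = True
--         return n + has
--
--     def blank(s):
--         return all(ch.isspace() for ch in s)
--
--     issues = []
--     if blank(company_name):
--         issues.append("company_name is empty")
--     if blank(sector):
--         issues.append("sector is empty")
--     for field, need, label in (
--         (recent_news, 3, "recent_news items"),
--         (financial_highlights, 2, "financial_highlights"),
--         (key_events, 1, "key_event"),
--         (sources, 1, "source URL"),
--     ):
--         got = count_items(field)
--         if got < need:
--             issues.append(f"Need at least {need} {label}, got {got}")
--
--     if issues: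
--         return "ISSUES FOUND: " + "; ".join(issues)
--     return "PASS — all structural checks passed"
-- ===== Notes on version B (the rewrite author's own statement) =====
-- stated objective: alternative
-- what changed: Replaces the four split/strip/filter list constructions with a one-pass character state machine that counts non-blank comma-separated segments (and an all-whitespace scan for the two presence checks), so no intermediate lists are built.
import Mathlib
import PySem

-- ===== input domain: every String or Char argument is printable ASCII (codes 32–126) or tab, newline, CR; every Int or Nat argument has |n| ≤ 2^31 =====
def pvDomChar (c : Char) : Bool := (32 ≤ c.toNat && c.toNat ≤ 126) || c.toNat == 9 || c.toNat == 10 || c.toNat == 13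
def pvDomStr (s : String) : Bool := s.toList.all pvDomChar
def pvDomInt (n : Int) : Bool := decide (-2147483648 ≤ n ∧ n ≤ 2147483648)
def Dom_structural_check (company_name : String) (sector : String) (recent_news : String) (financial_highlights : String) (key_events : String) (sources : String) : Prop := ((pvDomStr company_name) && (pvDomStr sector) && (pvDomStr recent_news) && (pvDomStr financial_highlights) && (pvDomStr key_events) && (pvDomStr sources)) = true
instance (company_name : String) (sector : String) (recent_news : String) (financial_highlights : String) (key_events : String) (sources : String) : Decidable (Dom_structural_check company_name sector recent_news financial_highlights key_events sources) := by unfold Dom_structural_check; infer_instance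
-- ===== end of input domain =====

-- B replaces A's four split/strip/filter list builds with a one-pass character state machine
-- counting non-blank comma-separated segments (and an all-whitespace scan for the presence checks);
-- same return value, no intermediate lists (objective: alternative).
-- ===== PORT A =====
def pvParseA (s : String) : List String :=
  if s ≠ "" then (((PySem.Str.split? s ",").getD []).map PySem.Str.strip).filter (fun x => x ≠ "") else []

def structural_check (company_name : String) (sector : String) (recent_news : String) (financial_highlights : String) (key_events : String) (sources : String) : String :=
  let news_items := pvParseA recent_news
  let fin_items := pvParseA financial_highlights
  let event_items := pvParseA key_events
  let source_items := pvParseA sources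
  let issues : List String := []
  let issues := if PySem.Str.strip company_name = "" then issues ++ ["company_name is empty"] else issues
  let issues := if PySem.Str.strip sector = "" then issues ++ ["sector is empty"] else issues
  let issues := if (news_items.length : Int) < 3 then issues ++ ["Need at least 3 recent_news items, got " ++ PySem.Int.toStr news_items.length] else issues
  let issues := if (fin_items.length : Int) < 2 then issues ++ ["Need at least 2 financial_highlights, got " ++ PySem.Int.toStr fin_items.length] else issues
  let issues := if (event_items.length : Int) < 1 then issues ++ ["Need at least 1 key_event, got " ++ PySem.Int.toStr event_items.length] else issues
  let issues := if (source_items.length : Int) < 1 then issues ++ ["Need at least 1 source URL, got " ++ PySem.Int.toStr source_items.length] else issues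
  if issues ≠ [] then "ISSUES FOUND: " ++ PySem.Str.join "; " issues
  else "PASS — all structural checks passed"

-- ===== PORT B =====
-- Source B count_items: one pass over the characters, state (count so far, current segment non-blank?)
def pvCountItems (s : String) : Int :=
  let st := s.toList.foldl (fun (p : Int × Bool) ch =>
      if ch = ',' then (p.1 + (if p.2 then 1 else 0), false)
      else if PySem.Chars.isspace ch then p
      else (p.1, true)) (0, false)
  st.1 + (if st.2 then 1 else 0)

-- Source B blank: all(ch.isspace() for ch in s)
def pvBlank (s : String) : Bool := s.toList.all PySem.Chars.isspace

def structural_check_alt (company_name : String) (sector : String) (recent_news : String) (financial_highlights : String) (key_events : String) (sources : String) : String :=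
  let issues : List String := []
  let issues := if pvBlank company_name then issues ++ ["company_name is empty"] else issues
  let issues := if pvBlank sector then issues ++ ["sector is empty"] else issues
  let issues := [(recent_news, (3 : Int), "recent_news items"),
                 (financial_highlights, (2 : Int), "financial_highlights"),
                 (key_events, (1 : Int), "key_event"),
                 (sources, (1 : Int), "source URL")].foldl (fun acc t =>
      let got := pvCountItems t.1
      if got < t.2.1 then
        acc ++ ["Need at least " ++ PySem.Int.toStr t.2.1 ++ " " ++ t.2.2 ++ ", got " ++ PySem.Int.toStr got]
      else acc) issues
  if issues ≠ [] then "ISSUES FOUND: " ++ PySem.Str.join "; " issues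
  else "PASS — all structural checks passed"

-- ===== PRECONDITION & SPEC =====
def Spec_structural_check (company_name : String) (sector : String) (recent_news : String) (financial_highlights : String) (key_events : String) (sources : String) (out : String) : Prop := out = structural_check_alt company_name sector recent_news financial_highlights key_events sources
instance (company_name : String) (sector : String) (recent_news : String) (financial_highlights : String) (key_events : String) (sources : String) (out : String) : Decidable (Spec_structural_check company_name sector recent_news financial_highlights key_events sources out) := by unfold Spec_structural_check; infer_instance

-- ===== CLAIM =====
def Claim_equal_structural_check : Prop := ∀ (company_name : String) (sector : String) (recent_news : String) (financial_highlights : String) (key_events : String) (sources : String), Dom_structural_check company_name sector recent_news financial_highlights key_events sources → Spec_structural_check company_name sector recent_news financial_highlights key_events sources (structural_check company_name sector recent_news financial_highlights key_events sources)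

-- ===== LEMMAS AND PROOFS =====
-- Reference split: what Python's s.split(",") produces, as a structural recursion.
def pvSplit : List Char → List (List Char)
  | [] => [[]]
  | c :: rest =>
      if c = ',' then [] :: pvSplit rest
      else (c :: (pvSplit rest).headI) :: (pvSplit rest).tail

-- B's scan, written as a recursion on the character list (value of the foldl).
def pvG : Bool → List Char → Int
  | has, [] => if has then 1 else 0
  | has, c :: rest =>
      if c = ',' then (if has then 1 else 0) + pvG false rest
      else pvG (has || !(PySem.Chars.isspace c)) rest

-- A's item count, at the char level: segments whose strip is non-empty.
def pvCnt (L : List (List Char)) : Int :=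
  ((L.map PySem.Chars.strip).filter (· ≠ [])).length

theorem pvSplit_cons_eq (s : List Char) : pvSplit s = (pvSplit s).headI :: (pvSplit s).tail := by
  cases s with
  | nil => rfl
  | cons c rest => simp [pvSplit]; split <;> simp

theorem go_spec : ∀ (fuel : Nat) (l cur : List Char) (acc : List (List Char)), l.length < fuel →
    PySem.Chars.splitOn.go [','] fuel l cur acc
      = acc.reverse ++ (cur.reverse ++ (pvSplit l).headI) :: (pvSplit l).tail := by
  intro fuel
  induction fuel with
  | zero => intro l cur acc h; omega
  | succ f ih =>
    intro l cur acc h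
    cases l with
    | nil => simp [PySem.Chars.splitOn.go, pvSplit]
    | cons c rest =>
      by_cases hc : c = ','
      · subst hc
        have hp : List.isPrefixOf [','] (',' :: rest) = true := by simp [List.isPrefixOf]
        rw [PySem.Chars.splitOn.go]
        simp only [hp, if_pos, List.length_cons, List.length_nil, List.drop_succ_cons, List.drop_zero]
        rw [ih rest [] (cur.reverse :: acc) (by simp at h ⊢; omega)]
        simp [pvSplit, ← pvSplit_cons_eq]
      · have hp : List.isPrefixOf [','] (c :: rest) = false := by
          simp [List.isPrefixOf]; exact fun h => absurd h.symm hc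
        rw [PySem.Chars.splitOn.go]
        simp only [hp]
        rw [ih rest (c :: cur) acc (by simp at h ⊢; omega)]
        simp [pvSplit, hc]

theorem splitOn_comma (s : List Char) : PySem.Chars.splitOn s [','] = pvSplit s := by
  rw [PySem.Chars.splitOn, go_spec (s.length + 1) s [] [] (by omega)]
  simp [← pvSplit_cons_eq]

theorem dropWhile_all_eq_nil {p : Char → Bool} {l : List Char}
    (h : ∀ x ∈ l.dropWhile p, p x) : l.dropWhile p = [] := by
  cases hd : l.dropWhile p with
  | nil => rfl
  | cons x xs =>
    have hne : l.dropWhile p ≠ [] := by simp [hd]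
    have h2 := List.head_dropWhile_not (p := p) hne
    have h3 : (l.dropWhile p).head hne = x := by simp [hd]
    rw [h3] at h2
    exact absurd (h x (by rw [hd]; exact List.mem_cons_self)) (by simp [h2])

theorem strip_nil_iff (cs : List Char) : PySem.Chars.strip cs = [] ↔ cs.all PySem.Chars.isspace = true := by
  simp only [PySem.Chars.strip, PySem.Chars.rstrip, PySem.Chars.lstrip, List.reverse_eq_nil_iff,
    List.dropWhile_eq_nil_iff, List.mem_reverse, List.all_eq_true]
  constructor
  · intro h
    exact List.dropWhile_eq_nil_iff.mp (dropWhile_all_eq_nil h)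
  · intro h x hx
    exact h x ((List.dropWhile_sublist _).mem hx)

theorem foldl_scan (s : List Char) : ∀ (n : Int) (has : Bool),
    (let st := s.foldl (fun (p : Int × Bool) ch =>
        if ch = ',' then (p.1 + (if p.2 then 1 else 0), false)
        else if PySem.Chars.isspace ch then p
        else (p.1, true)) (n, has)
     st.1 + (if st.2 then 1 else 0)) = n + pvG has s := by
  induction s with
  | nil => intro n has; simp [pvG]
  | cons c rest ih =>
    intro n has
    by_cases hc : c = ','
    · subst hc
      simp only [List.foldl_cons, if_pos rfl, pvG] at *
      rw [ih]
      cases has <;> simp <;> ring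
    · by_cases hw : PySem.Chars.isspace c = true
      · simp only [List.foldl_cons, if_neg hc, hw, if_pos, pvG] at *
        simp [hw, ih]
      · simp only [List.foldl_cons, if_neg hc, pvG] at *
        simp [hw, ih]

theorem g_spec (s : List Char) : ∀ has : Bool,
    pvG has s = (if has = true ∨ PySem.Chars.strip (pvSplit s).headI ≠ [] then 1 else 0)
      + pvCnt (pvSplit s).tail := by
  induction s with
  | nil =>
    intro has
    simp [pvG, pvSplit, pvCnt, PySem.Chars.strip, PySem.Chars.lstrip, PySem.Chars.rstrip]
  | cons c rest ih =>
    intro has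
    obtain ⟨h0, t0, hps⟩ : ∃ h0 t0, pvSplit rest = h0 :: t0 :=
      ⟨(pvSplit rest).headI, (pvSplit rest).tail, pvSplit_cons_eq rest⟩
    by_cases hc : c = ','
    · subst hc
      have hsp : pvSplit (',' :: rest) = [] :: h0 :: t0 := by simp [pvSplit, hps]
      rw [show pvG has (',' :: rest) = (if has = true then 1 else 0) + pvG false rest from by
        simp [pvG]]
      rw [ih false, hps, hsp]
      simp only [List.headI, List.tail, pvCnt, List.map_cons, List.filter_cons]
      have hnil : PySem.Chars.strip ([] : List Char) = [] := by decide
      by_cases h1 : PySem.Chars.strip h0 = [] <;> cases has <;> simp [hnil, h1] <;> push_cast <;> ring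
    · have hsp : pvSplit (c :: rest) = (c :: h0) :: t0 := by simp [pvSplit, hc, hps]
      rw [show pvG has (c :: rest) = pvG (has || !(PySem.Chars.isspace c)) rest from by
        simp [pvG, hc]]
      rw [ih, hps, hsp]
      simp only [List.headI, List.tail]
      have hs : PySem.Chars.strip (c :: h0) = [] ↔
          (PySem.Chars.isspace c = true ∧ PySem.Chars.strip h0 = []) := by
        rw [strip_nil_iff, strip_nil_iff]; simp
      by_cases hw : PySem.Chars.isspace c = true <;>
      by_cases h1 : PySem.Chars.strip h0 = [] <;>
        simp [hw, h1, hs] <;> cases has <;> simp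

theorem pvCountItems_eq_cnt (s : String) : pvCountItems s = pvCnt (pvSplit s.toList) := by
  obtain ⟨h0, t0, hps⟩ : ∃ h0 t0, pvSplit s.toList = h0 :: t0 :=
    ⟨(pvSplit s.toList).headI, (pvSplit s.toList).tail, pvSplit_cons_eq s.toList⟩
  have h1 := foldl_scan s.toList 0 false
  simp only [pvCountItems]
  rw [h1, g_spec s.toList false, hps]
  simp only [List.headI, List.tail, pvCnt, List.map_cons, List.filter_cons]
  by_cases h : PySem.Chars.strip h0 = [] <;> simp [h] <;> push_cast <;> ring

theorem strStrip_empty_iff (x : String) : (PySem.Str.strip x = "") ↔ PySem.Chars.strip x.toList = [] := by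
  rw [← PySem.Str.toList_strip]
  constructor
  · intro h; rw [h]; rfl
  · intro h; exact String.toList_inj.mp (by rw [h]; rfl)

theorem count_eq (s : String) :
    (((((PySem.Str.split? s ",").getD []).map PySem.Str.strip).filter (· ≠ "")).length : Int)
      = pvCountItems s := by
  have hb := PySem.Str.split?_map s ","
  have hsep : ("," : String).toList = [','] := by decide
  rw [hsep] at hb
  rw [show PySem.Chars.split? s.toList [','] = some (PySem.Chars.splitOn s.toList [',']) from by
    simp [PySem.Chars.split?]] at hb
  obtain ⟨L, hL, hmap⟩ : ∃ L, PySem.Str.split? s "," = some L ∧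
      L.map String.toList = PySem.Chars.splitOn s.toList [','] := by
    cases h : PySem.Str.split? s "," with
    | none => rw [h] at hb; simp at hb
    | some L => rw [h] at hb; simp at hb; exact ⟨L, rfl, hb⟩
  rw [hL, pvCountItems_eq_cnt, ← splitOn_comma, ← hmap]
  simp only [Option.getD_some, pvCnt, List.map_map, List.filter_map, List.length_map]
  rw [List.filter_congr (q := (fun x => decide (x ≠ [])) ∘ PySem.Chars.strip ∘ String.toList)
    (fun x _ => by simp [Function.comp, strStrip_empty_iff x])]

-- A's "if field else []" guard is redundant for the count: the count of "" is 0 either way.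
theorem parseA_len (s : String) : ((pvParseA s).length : Int) = pvCountItems s := by
  unfold pvParseA
  by_cases h : s = ""
  · subst h; simp; decide
  · simp only [h, ne_eq, not_false_eq_true, if_pos]
    exact count_eq s

theorem blank_iff (s : String) : (PySem.Str.strip s = "") ↔ pvBlank s = true := by
  rw [strStrip_empty_iff, strip_nil_iff, pvBlank]

-- ===== VERDICT =====
set_option maxHeartbeats 2000000 in
theorem structural_check_spec : Claim_equal_structural_check := by
  intro cn se rn fh ke so _
  unfold Spec_structural_check structural_check structural_check_alt
  have e3 : "Need at least " ++ PySem.Int.toStr 3 ++ " " ++ "recent_news items" ++ ", got " = "Need at least 3 recent_news items, got " := by decide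
  have e2 : "Need at least " ++ PySem.Int.toStr 2 ++ " " ++ "financial_highlights" ++ ", got " = "Need at least 2 financial_highlights, got " := by decide
  have e1a : "Need at least " ++ PySem.Int.toStr 1 ++ " " ++ "key_event" ++ ", got " = "Need at least 1 key_event, got " := by decide
  have e1b : "Need at least " ++ PySem.Int.toStr 1 ++ " " ++ "source URL" ++ ", got " = "Need at least 1 source URL, got " := by decide
  have hrn := parseA_len rn
  have hfh := parseA_len fh
  have hke := parseA_len ke
  have hso := parseA_len so
  simp only [List.foldl, e3, e2, e1a, e1b, ← hrn, ← hfh, ← hke, ← hso]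
  by_cases h1 : PySem.Str.strip cn = "" <;>
  by_cases h2 : PySem.Str.strip se = "" <;>
  by_cases h3 : ((pvParseA rn).length : Int) < 3 <;>
  by_cases h4 : ((pvParseA fh).length : Int) < 2 <;>
  by_cases h5 : ((pvParseA ke).length : Int) < 1 <;>
  by_cases h6 : ((pvParseA so).length : Int) < 1 <;>
  simp [h1, h2, h3, h4, h5, h6, (blank_iff cn).symm, (blank_iff se).symm]
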